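-- pv_equiv track=rewrite | github.com/cjhgo/talkshow | talkshow/parser/md_parser.py | _identify_section_type
-- ===== SOURCE A (Python) =====
-- def _identify_section_type(section: str) -> str:
--     """Identify if section is user, assistant, or other."""
--     lines = section.split('\n')
--
--     for line in lines:
--         line = line.strip()
--         if line.startswith('_**User**_'):
--             return 'user'
--         elif line.startswith('_**Assistant**_'):
--             return 'assistant'
--
--     return 'other'
-- ===== SOURCE B (Python) =====
-- def _identify_section_type(section: str) -> str:
--     """Identify if section is user, assistant, or other."""
--     n = len(section)
--     i = 0
--     while True:
--         # skip leading whitespace of the current line (everything strip() removes except '\n')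
--         j = i
--         while j < n and section[j] in ' \t\r\x0b\x0c':
--             j += 1
--         if section.startswith('_**User**_', j):
--             return 'user'
--         if section.startswith('_**Assistant**_', j):
--             return 'assistant'
--         # jump directly to the start of the next line
--         k = section.find('\n', i)
--         if k == -1:
--             return 'other'
--         i = k + 1
-- ===== Notes on version B (the rewrite author's own statement) =====
-- stated objective: alternative
-- what changed: Replaced the split-into-lines plus per-line strip()/startswith loop by a single index-based scan over the raw string (skip line-local whitespace, test both markers at an offset, jump past the next newline with find), so no list of lines and no stripped line copies are ever built.
import Mathlib
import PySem

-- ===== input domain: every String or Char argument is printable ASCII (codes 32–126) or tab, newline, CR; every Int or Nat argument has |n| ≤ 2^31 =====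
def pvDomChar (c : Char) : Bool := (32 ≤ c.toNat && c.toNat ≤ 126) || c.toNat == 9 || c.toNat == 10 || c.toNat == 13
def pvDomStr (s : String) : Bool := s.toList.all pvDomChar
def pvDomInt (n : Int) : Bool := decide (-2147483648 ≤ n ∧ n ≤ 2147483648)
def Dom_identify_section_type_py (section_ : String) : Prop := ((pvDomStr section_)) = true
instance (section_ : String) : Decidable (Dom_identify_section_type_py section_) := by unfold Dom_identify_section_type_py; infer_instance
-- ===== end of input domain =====

-- B replaces A's split('\n') + per-line strip()/startswith loop by a single scan of the raw
-- string (skip line-local whitespace, test markers at an offset, jump past the next '\n');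
-- no intermediate list of lines or stripped copies is built. Return values are identical.

-- ===== PORT A =====
-- the 'for line in lines' loop of A
def identify_section_type_loopA : List (List Char) → String
  | [] => "other"
  | l :: rest =>
    let line := PySem.Chars.strip l
    if PySem.Chars.startswith line "_**User**_".toList then "user"
    else if PySem.Chars.startswith line "_**Assistant**_".toList then "assistant"
    else identify_section_type_loopA rest

def identify_section_type_py (section_ : String) : String :=
  identify_section_type_loopA (PySem.Chars.splitOn section_.toList ['\n'])

-- ===== PORT B =====
-- the character class of B's inner whitespace-skipping loop: ' \t\r\x0b\x0c'
def altIsWS (c : Char) : Bool := c == ' ' || c == '\t' || c == '\r' || c == '\x0b' || c == '\x0c'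

-- B's 'k = section.find('\n', i); i = k + 1': the rest of the string after the next '\n'
def altNextLine : List Char → Option (List Char)
  | [] => none
  | c :: rest => if c = '\n' then some rest else altNextLine rest

-- termination of B's outer while loop (used by the port's decreasing_by)
theorem altNextLine_length : ∀ (cs rest : List Char), altNextLine cs = some rest → rest.length < cs.length := by
  intro cs
  induction cs with
  | nil => intro rest h; simp [altNextLine] at h
  | cons c cs ih =>
    intro rest h
    simp only [altNextLine] at h
    split at h
    · cases h; simp
    · exact Nat.lt_trans (ih rest h) (by simp)

-- B's outer while loop
def altLoop (cs : List Char) : String :=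
  let j := cs.dropWhile altIsWS
  if List.isPrefixOf "_**User**_".toList j then "user"
  else if List.isPrefixOf "_**Assistant**_".toList j then "assistant"
  else
    match h : altNextLine cs with
    | none => "other"
    | some rest => altLoop rest
termination_by cs.length
decreasing_by exact altNextLine_length cs rest h

def identify_section_type_py_alt (section_ : String) : String := altLoop section_.toList

-- ===== PRECONDITION & SPEC =====
def Spec_identify_section_type_py (section_ : String) (out : String) : Prop := out = identify_section_type_py_alt section_
instance (section_ : String) (out : String) : Decidable (Spec_identify_section_type_py section_ out) := by unfold Spec_identify_section_type_py; infer_instance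

-- ===== CLAIM (what is proved, stated in full; the proofs are below) =====
def Claim_equal_identify_section_type_py : Prop := ∀ (section_ : String), Dom_identify_section_type_py section_ → Spec_identify_section_type_py section_ (identify_section_type_py section_)

-- ===== LEMMAS AND PROOFS =====

-- equations of PySem.Chars.splitOn.go for sep = ['\n']
theorem go_nil (fuel : Nat) (cur : List Char) (acc : List (List Char)) :
    PySem.Chars.splitOn.go ['\n'] (fuel+1) [] cur acc = (cur.reverse :: acc).reverse := by
  rw [PySem.Chars.splitOn.go]; omega

theorem go_cons_ne (fuel : Nat) (c : Char) (rest cur : List Char) (acc : List (List Char)) (h : c ≠ '\n') :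
    PySem.Chars.splitOn.go ['\n'] (fuel+1) (c::rest) cur acc = PySem.Chars.splitOn.go ['\n'] fuel rest (c::cur) acc := by
  rw [PySem.Chars.splitOn.go]
  simp [List.isPrefixOf, Ne.symm h]

theorem go_cons_nl (fuel : Nat) (rest cur : List Char) (acc : List (List Char)) :
    PySem.Chars.splitOn.go ['\n'] (fuel+1) ('\n'::rest) cur acc = PySem.Chars.splitOn.go ['\n'] fuel rest [] (cur.reverse :: acc) := by
  rw [PySem.Chars.splitOn.go]
  simp [List.isPrefixOf]

theorem go_no_nl : ∀ (l : List Char) (fuel : Nat) (cur : List Char) (acc : List (List Char)),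
    l.length < fuel → '\n' ∉ l →
    PySem.Chars.splitOn.go ['\n'] fuel l cur acc = ((cur.reverse ++ l) :: acc).reverse := by
  intro l
  induction l with
  | nil =>
    intro fuel cur acc hf _
    obtain ⟨f, rfl⟩ : ∃ f, fuel = f + 1 := ⟨fuel - 1, by omega⟩
    simp [go_nil]
  | cons c rest ih =>
    intro fuel cur acc hf hn
    obtain ⟨f, rfl⟩ : ∃ f, fuel = f + 1 := ⟨fuel - 1, by omega⟩
    rw [go_cons_ne _ _ _ _ _ (by simp at hn; exact Ne.symm hn.1)]
    rw [ih f (c::cur) acc (by simp at hf ⊢; omega) (by simp at hn; exact hn.2)]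
    simp

theorem splitOn_no_nl (cs : List Char) (h : '\n' ∉ cs) :
    PySem.Chars.splitOn cs ['\n'] = [cs] := by
  rw [PySem.Chars.splitOn, go_no_nl cs (cs.length+1) [] [] (by omega) h]
  simp

theorem go_acc : ∀ (l : List Char) (fuel : Nat) (cur : List Char) (acc : List (List Char)),
    l.length < fuel →
    PySem.Chars.splitOn.go ['\n'] fuel l cur acc = acc.reverse ++ PySem.Chars.splitOn.go ['\n'] fuel l cur [] := by
  intro l
  induction l with
  | nil =>
    intro fuel cur acc hf
    obtain ⟨f, rfl⟩ : ∃ f, fuel = f + 1 := ⟨fuel - 1, by omega⟩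
    simp [go_nil]
  | cons c rest ih =>
    intro fuel cur acc hf
    obtain ⟨f, rfl⟩ : ∃ f, fuel = f + 1 := ⟨fuel - 1, by omega⟩
    by_cases hc : c = '\n'
    · subst hc
      rw [go_cons_nl, go_cons_nl]
      rw [ih f [] (cur.reverse :: acc) (by simp at hf ⊢; omega),
          ih f [] [cur.reverse] (by simp at hf ⊢; omega)]
      simp
    · rw [go_cons_ne _ _ _ _ _ hc, go_cons_ne _ _ _ _ _ hc]
      rw [ih f (c::cur) acc (by simp at hf ⊢; omega)]

theorem go_line : ∀ (L : List Char) (fuel : Nat) (cur : List Char) (acc : List (List Char)) (tail : List Char),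
    '\n' ∉ L →
    PySem.Chars.splitOn.go ['\n'] (L.length + fuel + 1) (L ++ '\n'::tail) cur acc
      = PySem.Chars.splitOn.go ['\n'] fuel tail [] ((cur.reverse ++ L) :: acc) := by
  intro L
  induction L with
  | nil => intro fuel cur acc tail _; simp [go_cons_nl]
  | cons c L ih =>
    intro fuel cur acc tail hn
    simp only [List.length_cons, List.cons_append]
    have hc : c ≠ '\n' := by simp at hn; exact Ne.symm hn.1
    rw [show L.length + 1 + fuel + 1 = (L.length + fuel + 1) + 1 by omega,
        go_cons_ne _ _ _ _ _ hc,
        ih fuel (c::cur) acc tail (by simp at hn; exact hn.2)]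
    simp

theorem splitOn_cons (L tail : List Char) (h : '\n' ∉ L) :
    PySem.Chars.splitOn (L ++ '\n'::tail) ['\n'] = L :: PySem.Chars.splitOn tail ['\n'] := by
  rw [PySem.Chars.splitOn]
  rw [show (L ++ '\n'::tail).length + 1 = L.length + (tail.length + 1) + 1 by simp]
  rw [go_line L (tail.length+1) [] [] tail h]
  rw [go_acc tail (tail.length+1) [] _ (by omega)]
  simp [PySem.Chars.splitOn]

-- altNextLine on the line decomposition
theorem altNextLine_no_nl (cs : List Char) (h : '\n' ∉ cs) : altNextLine cs = none := by
  induction cs with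
  | nil => rfl
  | cons c rest ih =>
    simp only [List.mem_cons, not_or] at h
    simp only [altNextLine, if_neg (Ne.symm h.1)]
    exact ih h.2

theorem altNextLine_line (L tail : List Char) (h : '\n' ∉ L) : altNextLine (L ++ '\n'::tail) = some tail := by
  induction L with
  | nil => simp [altNextLine]
  | cons c L ih =>
    simp only [List.mem_cons, not_or] at h
    simp only [List.cons_append, altNextLine, if_neg (Ne.symm h.1)]
    exact ih h.2

-- on domain characters other than '\n', Python's str.strip whitespace class is B's ' \t\r\x0b\x0c'
theorem wsAgree (c : Char) (hd : pvDomChar c = true) (hn : c ≠ '\n') : PySem.Chars.isspace c = altIsWS c := by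
  have e : ∀ d : Char, (c == d) = decide (c.toNat = d.toNat) := by
    intro d
    rw [Bool.eq_iff_iff]
    simp [(eq_iff_eq_of_cmp_eq_cmp rfl : c = d ↔ c.toNat = d.toNat)]
  have hn' : c.toNat ≠ 10 := by
    intro h; exact hn ((eq_iff_eq_of_cmp_eq_cmp rfl : c = '\n' ↔ c.toNat = ('\n').toNat).2 h)
  simp only [pvDomChar, Bool.or_eq_true, Bool.and_eq_true, decide_eq_true_iff, beq_iff_eq] at hd
  simp only [PySem.Chars.isspace, altIsWS, e]
  rw [Bool.eq_iff_iff]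
  simp only [Bool.or_eq_true, Bool.and_eq_true, decide_eq_true_iff]
  rw [show (' ').toNat = 32 from rfl, show ('\t').toNat = 9 from rfl,
      show ('\r').toNat = 13 from rfl, show ('\x0b').toNat = 11 from rfl,
      show ('\x0c').toNat = 12 from rfl]
  omega

theorem dropWhile_ws_agree (L : List Char) (hd : L.all pvDomChar = true) (hn : '\n' ∉ L) :
    L.dropWhile PySem.Chars.isspace = L.dropWhile altIsWS := by
  induction L with
  | nil => rfl
  | cons c L ih =>
    simp only [List.all_cons, Bool.and_eq_true] at hd
    simp only [List.mem_cons, not_or] at hn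
    rw [List.dropWhile_cons, List.dropWhile_cons, wsAgree c hd.1 (Ne.symm hn.1)]
    split
    · exact ih hd.2 hn.2
    · rfl

-- a pattern ending in a non-space char is a prefix of rstrip x iff it is a prefix of x
theorem prefix_rstrip (m x : List Char) (hm : m ≠ []) (hl : PySem.Chars.isspace (m.getLast hm) = false) :
    m <+: PySem.Chars.rstrip x ↔ m <+: x := by
  constructor
  · intro h
    refine h.trans ?_
    conv_rhs => rw [← List.reverse_reverse x]
    rw [PySem.Chars.rstrip]
    exact List.reverse_prefix.mpr (List.dropWhile_suffix _)
  · rintro ⟨t, rfl⟩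
    rw [PySem.Chars.rstrip, List.reverse_append, List.dropWhile_append]
    split
    · obtain ⟨m', c, rfl⟩ : ∃ m' c, m = m' ++ [c] := ⟨m.dropLast, m.getLast hm, (List.dropLast_append_getLast hm).symm⟩
      rw [List.getLast_append_singleton] at hl
      simp only [List.reverse_append, List.reverse_cons, List.reverse_nil, List.nil_append,
        List.cons_append, List.dropWhile_cons, hl]
      simp
    · rw [List.reverse_append]
      simp only [List.reverse_reverse]
      exact ⟨_, rfl⟩

-- a '\n'-free pattern is a prefix of d ++ '\n'::t iff it is a prefix of d
theorem prefix_stop_nl (m d t : List Char) (hm : '\n' ∉ m) :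
    m <+: d ++ '\n'::t ↔ m <+: d := by
  constructor
  · intro h
    rcases List.prefix_or_prefix_of_prefix h (List.prefix_append d ('\n'::t)) with h' | h'
    · exact h'
    · obtain ⟨m', rfl⟩ := h'
      have h2 : m' <+: '\n'::t := (List.prefix_append_right_inj d).mp h
      rcases m' with _ | ⟨c, m''⟩
      · simp
      · have hc : c = '\n' := by
          obtain ⟨u, hu⟩ := h2
          exact (List.cons_eq_cons.mp (by simpa using hu)).1
        exact absurd (by simp [hc] : '\n' ∈ d ++ c :: m'') hm
  · intro h
    exact h.trans (List.prefix_append d _)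

-- the per-line test of A agrees with B's in-place test
theorem line_test (m L r : List Char) (hd : L.all pvDomChar = true) (hn : '\n' ∉ L)
    (hm : m ≠ []) (hl : PySem.Chars.isspace (m.getLast hm) = false) (hmn : '\n' ∉ m)
    (hr : r = [] ∨ ∃ t, r = '\n'::t) :
    PySem.Chars.startswith (PySem.Chars.strip L) m = List.isPrefixOf m ((L ++ r).dropWhile altIsWS) := by
  have hdrop : (L ++ r).dropWhile altIsWS = L.dropWhile altIsWS ++ r := by
    rw [List.dropWhile_append]
    split
    · rename_i he
      rcases hr with rfl | ⟨t, rfl⟩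
      · simp_all
      · rw [List.dropWhile_cons]
        simp only [List.isEmpty_iff] at he
        rw [he]
        simp [altIsWS]
    · rfl
  rw [hdrop, Bool.eq_iff_iff, PySem.Chars.startswith_iff, List.isPrefixOf_iff_prefix]
  rw [PySem.Chars.strip, prefix_rstrip m _ hm hl, PySem.Chars.lstrip, dropWhile_ws_agree L hd hn]
  rcases hr with rfl | ⟨t, rfl⟩
  · simp
  · exact (prefix_stop_nl m _ t hmn).symm

theorem main_lemma : ∀ (n : Nat) (cs : List Char), cs.length ≤ n → cs.all pvDomChar = true →
    identify_section_type_loopA (PySem.Chars.splitOn cs ['\n']) = altLoop cs := by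
  intro n
  induction n with
  | zero =>
    intro cs hlen hd
    have : cs = [] := by cases cs <;> simp_all
    subst this
    rw [splitOn_no_nl [] (by simp), altLoop]
    simp [identify_section_type_loopA, altNextLine, PySem.Chars.strip, PySem.Chars.lstrip,
      PySem.Chars.rstrip, PySem.Chars.startswith]
  | succ n ih =>
    intro cs hlen hd
    by_cases hmem : '\n' ∈ cs
    · -- cs = L ++ '\n' :: tail with '\n' ∉ L
      obtain ⟨L, tail, hL, hcs⟩ : ∃ L tail, '\n' ∉ L ∧ cs = L ++ '\n'::tail := by
        clear ih hlen hd
        induction cs with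
        | nil => cases hmem
        | cons c cs ihc =>
          by_cases hc : c = '\n'
          · exact ⟨[], cs, by simp, by rw [hc]; rfl⟩
          · obtain ⟨L, t, h1, h2⟩ := ihc (by
              rcases (List.mem_cons.mp hmem) with h | h
              · exact absurd h.symm hc
              · exact h)
            exact ⟨c::L, t, by simp [h1]; exact fun h => hc h.symm, by rw [h2]; rfl⟩
      have hdL : L.all pvDomChar = true := by
        rw [List.all_eq_true] at hd ⊢
        exact fun x hx => hd x (hcs ▸ List.mem_append_left _ hx)
      have hdtail : tail.all pvDomChar = true := by
        rw [List.all_eq_true] at hd ⊢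
        intro x hx
        exact hd x (hcs ▸ List.mem_append_right L (List.mem_cons_of_mem _ hx))
      have hlen' : tail.length ≤ n := by
        have : cs.length = L.length + tail.length + 1 := by rw [hcs]; simp; omega
        omega
      have hU := line_test "_**User**_".toList L ('\n'::tail) hdL hL (by decide) (by decide) (by decide) (Or.inr ⟨tail, rfl⟩)
      have hA := line_test "_**Assistant**_".toList L ('\n'::tail) hdL hL (by decide) (by decide) (by decide) (Or.inr ⟨tail, rfl⟩)
      rw [hcs, splitOn_cons L tail hL, altLoop]
      simp only [identify_section_type_loopA]
      rw [← hU, ← hA]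
      split_ifs
      · rfl
      · rfl
      · split
        · rename_i heq
          rw [altNextLine_line L tail hL] at heq
          cases heq
        · rename_i rest heq
          rw [altNextLine_line L tail hL] at heq
          cases heq
          exact ih tail hlen' hdtail
    · rw [splitOn_no_nl cs hmem, altLoop]
      simp only [identify_section_type_loopA]
      have hU := line_test "_**User**_".toList cs [] hd hmem (by decide) (by decide) (by decide) (Or.inl rfl)
      have hA := line_test "_**Assistant**_".toList cs [] hd hmem (by decide) (by decide) (by decide) (Or.inl rfl)
      rw [List.append_nil] at hU hA
      rw [← hU, ← hA]
      split_ifs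
      · rfl
      · rfl
      · split
        · rfl
        · rename_i rest heq
          rw [altNextLine_no_nl cs hmem] at heq
          cases heq

-- ===== VERDICT (by name: the statement is the Claim_ definition above) =====
theorem identify_section_type_py_spec : Claim_equal_identify_section_type_py := by
  intro s hdom
  unfold Spec_identify_section_type_py identify_section_type_py identify_section_type_py_alt
  exact main_lemma s.toList.length s.toList le_rfl hdom
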